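-- pv_equiv track=rewrite | github.com/daniel-reich/ubiquitous-fiesta | WixXhsdqcNHe3vTn3_9.py | how_bad
-- ===== SOURCE A (Python) =====
-- def how_bad(n):
--   descriptors = []
--   binary = "{0:b}".format(n)
--   ones = binary.count('1')
--
--   if ones % 2 == 0:
--     descriptors.append("Evil")
--   elif ones % 2 != 0:
--     descriptors.append('Odious')
--
--   is_prime = True
--   if ones == 1:
--     is_prime = False
--   else:
--     for x in range(2, ones):
--       if ones % x == 0:
--         is_prime = False
--   if is_prime:
--     descriptors.append('Pernicious')
--   return descriptors
-- ===== SOURCE B (Python) =====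
-- def how_bad(n):
--   ones = "{0:b}".format(n).count('1')
--   if ones == 1:
--     prime = False
--   else:
--     prime = True
--     x = 2
--     while x * x <= ones:
--       if ones % x == 0:
--         prime = False
--         break
--       x += 1
--   return (["Evil"] if ones % 2 == 0 else ["Odious"]) + (["Pernicious"] if prime else [])
-- ===== Notes on version B (the rewrite author's own statement) =====
-- stated objective: alternative
-- what changed: Replaces A's full trial-division loop over range(2, ones) with a sqrt-bounded while loop (x*x <= ones) that breaks on the first divisor, keeping the identical binary-string popcount and the ones==1 special case.
import Mathlib
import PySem

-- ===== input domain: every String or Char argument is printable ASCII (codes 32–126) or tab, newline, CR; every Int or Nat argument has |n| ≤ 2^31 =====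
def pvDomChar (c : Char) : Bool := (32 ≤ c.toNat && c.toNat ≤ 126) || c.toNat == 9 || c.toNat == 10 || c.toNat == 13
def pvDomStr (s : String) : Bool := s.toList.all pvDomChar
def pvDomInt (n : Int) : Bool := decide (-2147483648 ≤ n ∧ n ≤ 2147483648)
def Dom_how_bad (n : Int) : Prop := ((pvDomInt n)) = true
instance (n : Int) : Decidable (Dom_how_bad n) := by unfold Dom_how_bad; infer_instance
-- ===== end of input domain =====

-- B replaces A's full trial-division loop over range(2, ones) with a sqrt-bounded
-- while loop that breaks on the first divisor (alternative decomposition; popcount line identical).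

-- ===== PORT A =====
-- hand port of "{0:b}".format(m) for m > 0 (no PySem primitive): exact binary digits, MSB first
def pvBinDigits (m : Nat) : List Char :=
  if m = 0 then [] else pvBinDigits (m / 2) ++ [if m % 2 = 1 then '1' else '0']

-- hand port of "{0:b}".format(n): '-' prefix for negative n, "0" for 0 — exact for every Int
def pvBin (n : Int) : List Char :=
  (if n < 0 then ['-'] else []) ++ (if n = 0 then ['0'] else pvBinDigits n.natAbs)

-- the body of A after 'ones = binary.count("1")'
def aClassify (ones : Nat) : List String :=
  let descriptors := if ones % 2 == 0 then ["Evil"] else ["Odious"]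
  let is_prime :=
    if ones == 1 then false
    else (PySem.List.pyRange 2 (ones : Int) 1).foldl
      (fun p x => if (ones : Int) % x == 0 then false else p) true
  if is_prime then descriptors ++ ["Pernicious"] else descriptors

def how_bad (n : Int) : List String :=
  aClassify ((pvBin n).count '1')

-- ===== PORT B =====
-- B's while loop: x from 2 while x*x <= ones, break (false) on first divisor
def bTrial (ones : Nat) (x : Nat) : Bool :=
  if x * x ≤ ones then
    if ones % x == 0 then false else bTrial ones (x + 1)
  else true
termination_by ones + 1 - x
decreasing_by
  rename_i h _
  have : x ≤ ones := by
    rcases Nat.eq_zero_or_pos x with h0 | h1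
    · omega
    · calc x ≤ x * x := Nat.le_mul_of_pos_left x h1
        _ ≤ ones := h
  omega

def bClassify (ones : Nat) : List String :=
  let prime := if ones == 1 then false else bTrial ones 2
  (if ones % 2 == 0 then ["Evil"] else ["Odious"]) ++
    (if prime then ["Pernicious"] else [])

def how_bad_alt (n : Int) : List String :=
  bClassify ((pvBin n).count '1')

-- ===== PRECONDITION & SPEC =====
def Spec_how_bad (n : Int) (out : List String) : Prop := out = how_bad_alt n
instance (n : Int) (out : List String) : Decidable (Spec_how_bad n out) := by unfold Spec_how_bad; infer_instance

-- ===== CLAIM (what is proved, stated in full; the proofs are below) =====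
def Claim_equal_how_bad : Prop := ∀ (n : Int), Dom_how_bad n → Spec_how_bad n (how_bad n)

-- ===== LEMMAS AND PROOFS =====
lemma pvBinDigits_length_le : ∀ (k m : Nat), m < 2 ^ k → (pvBinDigits m).length ≤ k := by
  intro k
  induction k with
  | zero => intro m hm; interval_cases m; simp [pvBinDigits]
  | succ k ih =>
    intro m hm
    rw [pvBinDigits]
    split
    · simp
    · have := ih (m / 2) (by omega)
      simp [List.length_append]
      omega

lemma ones_le_32 (n : Int) (h : Dom_how_bad n) : (pvBin n).count '1' ≤ 32 := by
  have hd : (pvBinDigits n.natAbs).length ≤ 32 := by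
    apply pvBinDigits_length_le 32
    have : n.natAbs ≤ 2 ^ 31 := by
      simp [Dom_how_bad, pvDomInt] at h
      omega
    omega
  have hc : ((if n = 0 then ['0'] else pvBinDigits n.natAbs)).count '1' ≤ 32 := by
    split
    · decide
    · exact le_trans (List.count_le_length) hd
  unfold pvBin
  split <;> simpa using hc

lemma classify_eq : ∀ o : Nat, o < 33 → aClassify o = bClassify o := by
  intro o ho
  interval_cases o <;> simp [aClassify, bClassify, bTrial, PySem.List.pyRange] <;> decide

-- ===== VERDICT (by name: the statement is the Claim_ definition above) =====
theorem how_bad_spec : Claim_equal_how_bad := by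
  intro n hdom
  unfold Spec_how_bad how_bad how_bad_alt
  exact classify_eq _ (by have := ones_le_32 n hdom; omega)
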